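-- pv_equiv track=rewrite | github.com/sueszli/vector-database-benchmark | dataset/python-mutated/nested_control_flow_test.py | dependent_inner_while
-- ===== SOURCE A (Python) =====
-- def dependent_inner_while(a, b):
--     if False:
--         while True:
--             i = 10
--     r = 1
--     while a > 0:
--         r += 1
--         tmp = b
--         while tmp > 0:
--             a -= 1
--             tmp -= 1
--         a -= 1
--     return r
-- ===== SOURCE B (Python) =====
-- def dependent_inner_while(a, b):
--     if a <= 0:
--         return 1
--     step = b + 1 if b > 0 else 1
--     return 1 + (a + step - 1) // step
-- ===== Notes on version B (the rewrite author's own statement) =====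
-- stated objective: faster
-- what changed: Replaces the nested decrement-by-one loops with a closed-form ceiling division: each outer iteration removes step = b+1 (or 1 if b <= 0) from a, so the result is 1 + ceil(a/step) for a > 0, computed in O(1).
import Mathlib
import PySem

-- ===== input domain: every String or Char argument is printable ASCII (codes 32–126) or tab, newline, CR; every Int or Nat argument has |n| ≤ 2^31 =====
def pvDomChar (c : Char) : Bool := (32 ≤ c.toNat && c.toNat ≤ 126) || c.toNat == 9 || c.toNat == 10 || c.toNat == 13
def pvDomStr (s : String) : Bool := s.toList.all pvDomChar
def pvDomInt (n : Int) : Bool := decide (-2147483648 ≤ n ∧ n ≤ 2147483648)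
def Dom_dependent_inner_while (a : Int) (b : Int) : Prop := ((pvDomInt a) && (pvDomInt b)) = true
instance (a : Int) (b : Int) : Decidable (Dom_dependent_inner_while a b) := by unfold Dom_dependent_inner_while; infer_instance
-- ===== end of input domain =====

-- B replaces the O(a) nested decrement loops with an O(1) closed-form ceiling division (faster, asymptotic).


-- ===== PORT A =====
-- inner 'while tmp > 0: a -= 1; tmp -= 1' (returns the final a; tmp is dead afterwards)
def pvInnerA (a tmp : Int) : Int :=
  if tmp > 0 then pvInnerA (a - 1) (tmp - 1) else a
termination_by tmp.toNat
decreasing_by omega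

theorem pvInnerA_le (a tmp : Int) : pvInnerA a tmp ≤ a := by
  fun_induction pvInnerA with
  | case1 a tmp h ih => omega
  | case2 a tmp h => omega

-- outer 'while a > 0: r += 1; <inner>; a -= 1'
def pvOuterA (a b r : Int) : Int :=
  if a > 0 then pvOuterA (pvInnerA a b - 1) b (r + 1) else r
termination_by a.toNat
decreasing_by have := pvInnerA_le a b; omega

def dependent_inner_while (a : Int) (b : Int) : Int :=
  pvOuterA a b 1

-- ===== PORT B =====
def dependent_inner_while_alt (a : Int) (b : Int) : Int :=
  if a ≤ 0 then 1
  else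
    let step : Int := if b > 0 then b + 1 else 1
    1 + PySem.Int.floordiv (a + step - 1) step

-- ===== PRECONDITION & SPEC =====
def Spec_dependent_inner_while (a : Int) (b : Int) (out : Int) : Prop := out = dependent_inner_while_alt a b
instance (a : Int) (b : Int) (out : Int) : Decidable (Spec_dependent_inner_while a b out) := by unfold Spec_dependent_inner_while; infer_instance

-- ===== CLAIM (what is proved, stated in full; the proofs are below) =====
def Claim_equal_dependent_inner_while : Prop := ∀ (a : Int) (b : Int), Dom_dependent_inner_while a b → Spec_dependent_inner_while a b (dependent_inner_while a b)

-- ===== LEMMAS AND PROOFS =====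

theorem pvInnerA_eq (a tmp : Int) : pvInnerA a tmp = a - max tmp 0 := by
  fun_induction pvInnerA with
  | case1 a tmp h ih => omega
  | case2 a tmp h => omega

-- one outer iteration subtracts exactly step = (if b > 0 then b + 1 else 1) from a
theorem ceil_step (a step : Int) (ha : 0 < a) (hpos : 0 < step) :
    PySem.Int.floordiv (a + step - 1) step =
      if a - step ≤ 0 then 1 else 1 + PySem.Int.floordiv (a - 1) step := by
  by_cases hle : a - step ≤ 0
  · rw [if_pos hle, PySem.Int.floordiv_eq_iff_of_pos hpos]; omega
  · rw [if_neg hle]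
    have hq := (PySem.Int.floordiv_eq_iff_of_pos hpos
      (a := a - 1) (q := PySem.Int.floordiv (a - 1) step)).mp rfl
    rw [PySem.Int.floordiv_eq_iff_of_pos hpos]
    constructor <;> nlinarith [hq.1, hq.2]

theorem alt_rec (a b : Int) (ha : 0 < a) :
    dependent_inner_while_alt a b =
      1 + dependent_inner_while_alt (a - (if b > 0 then b + 1 else 1)) b := by
  by_cases hb : b > 0
  · simp only [dependent_inner_while_alt, if_pos hb, if_neg (not_le.mpr ha)]
    rw [ceil_step a (b + 1) ha (by omega),
        show a - (b + 1) + (b + 1) - 1 = a - 1 by ring]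
  · simp only [dependent_inner_while_alt, if_neg hb, if_neg (not_le.mpr ha)]
    rw [ceil_step a 1 ha (by omega), show a - 1 + 1 - 1 = a - 1 by ring]

theorem pvOuterA_eq (n : Nat) : ∀ (a b r : Int), a.toNat ≤ n →
    pvOuterA a b r = r - 1 + dependent_inner_while_alt a b := by
  induction n with
  | zero =>
    intro a b r h
    have ha : a ≤ 0 := by omega
    rw [pvOuterA, if_neg (by omega)]
    simp [dependent_inner_while_alt, ha]
  | succ n ih =>
    intro a b r h
    by_cases ha : 0 < a
    · rw [pvOuterA, if_pos ha]
      have hin := pvInnerA_eq a b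
      have hstep : pvInnerA a b - 1 = a - (if b > 0 then b + 1 else 1) := by
        split <;> omega
      rw [ih _ b (r + 1) (by split at hstep <;> omega), hstep, alt_rec a b ha]
      ring
    · rw [pvOuterA, if_neg ha]
      simp [dependent_inner_while_alt, show a ≤ 0 by omega]

-- ===== VERDICT (by name: the statement is the Claim_ definition above) =====
theorem dependent_inner_while_spec : Claim_equal_dependent_inner_while := by
  intro a b _
  unfold Spec_dependent_inner_while dependent_inner_while
  have := pvOuterA_eq a.toNat a b 1 le_rfl
  omega
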